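-- pv_equiv track=rewrite | github.com/miliar/Code_Jam_Webscraper | solutions_python/solutions_year16_round2_nr1/683.py | sleep
-- ===== SOURCE A (Python) =====
-- def sleep(n):
--     n=list(n)
--     a=[]
--     for x in l:
--         c=n.count(x)
--         for i in range(c):
--             a.append(d[x][0])
--             for j in d[x][1]:
--                 n.remove(j)
--     return(''.join(map(str,sorted(a))))
--
-- l=list("ZXWSVUGTOI")
--
-- d={
--     'Z':(0,"ZERO"), 'O':(1,"ONE"), 'W':(2,"TWO"), 'T':(3,"THREE"), 'U':(4,"FOUR"),
--     'V':(5,"FIVE"), 'X':(6,"SIX"), 'S':(7,"SEVEN"), 'G':(8,"EIGHT"), 'I':(9,"NINE")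
--     }
-- ===== SOURCE B (Python) =====
-- def sleep(n):
--     cnt = {}
--     for ch in n:
--         cnt[ch] = cnt.get(ch, 0) + 1
--     g = lambda c: cnt.get(c, 0)
--     c0 = g('Z'); c6 = g('X'); c2 = g('W')
--     c7 = g('S') - c6
--     c5 = g('V') - c7
--     c4 = g('U'); c8 = g('G')
--     c3 = g('T') - c2 - c8
--     c1 = g('O') - c0 - c2 - c4
--     c9 = g('I') - c6 - c5 - c8
--     return ('0' * c0 + '1' * c1 + '2' * c2 + '3' * c3 + '4' * c4 +
--             '5' * c5 + '6' * c6 + '7' * c7 + '8' * c8 + '9' * c9)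
-- ===== Notes on version B (the rewrite author's own statement) =====
-- stated objective: faster
-- what changed: Replaces the quadratic count-and-remove simulation (repeated n.count and n.remove on a shrinking list, then a sort) by one frequency-counting pass plus closed-form subtraction of each digit's count, emitting the digits directly in ascending order.
import Mathlib
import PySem

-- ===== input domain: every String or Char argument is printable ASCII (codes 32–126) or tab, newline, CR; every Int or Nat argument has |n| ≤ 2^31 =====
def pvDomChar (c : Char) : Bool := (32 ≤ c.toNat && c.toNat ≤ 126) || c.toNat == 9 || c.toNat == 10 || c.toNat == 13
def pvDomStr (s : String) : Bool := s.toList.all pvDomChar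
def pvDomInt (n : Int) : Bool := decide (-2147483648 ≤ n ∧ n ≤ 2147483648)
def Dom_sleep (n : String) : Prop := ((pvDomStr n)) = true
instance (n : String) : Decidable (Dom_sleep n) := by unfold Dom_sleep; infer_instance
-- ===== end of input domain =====

-- B replaces A's quadratic count-and-remove simulation by one counting pass plus
-- closed-form subtraction per digit, emitting digits in ascending order (objective: faster).


-- ===== PORT A =====
-- module-level l = list("ZXWSVUGTOI")
def pvL : List Char := ['Z', 'X', 'W', 'S', 'V', 'U', 'G', 'T', 'O', 'I']

-- module-level dict d
def pvD : PySem.Dict Char (Int × String) :=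
  PySem.Dict.ofList
    [('Z', (0, "ZERO")), ('O', (1, "ONE")), ('W', (2, "TWO")), ('T', (3, "THREE")),
     ('U', (4, "FOUR")), ('V', (5, "FIVE")), ('X', (6, "SIX")), ('S', (7, "SEVEN")),
     ('G', (8, "EIGHT")), ('I', (9, "NINE"))]

-- n.remove(j): Python raises ValueError when j is absent; those inputs are outside
-- Pre_sleep, so the `.getD xs` fallback is never reached on admitted inputs.
def pvRemove (xs : List Char) (v : Char) : List Char := (PySem.List.remove? xs v).getD xs

-- one iteration of A's outer loop (body for one x in l); d[x] always hits a key of d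
-- for x ∈ l, so the getD default is never used.
def pvStep (st : List Int × List Char) (x : Char) : List Int × List Char :=
  let e := pvD.getD x (0, "")
  (PySem.List.pyRange 0 (st.2.count x : Int)).foldl
    (fun st2 _ => (st2.1 ++ [e.1], e.2.toList.foldl pvRemove st2.2)) st

def sleep (n : String) : String :=
  PySem.Str.join ""
    (((PySem.List.sorted (pvL.foldl pvStep ([], n.toList)).1 (fun x => x)).map PySem.Int.toStr))

-- ===== PORT B =====
def sleep_alt (n : String) : String :=
  let cnt := n.toList.foldl (fun d ch => d.insert ch (d.getD ch 0 + 1))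
      (PySem.Dict.empty : PySem.Dict Char Int)
  let g := fun c => cnt.getD c 0
  let c0 := g 'Z'
  let c6 := g 'X'
  let c2 := g 'W'
  let c7 := g 'S' - c6
  let c5 := g 'V' - c7
  let c4 := g 'U'
  let c8 := g 'G'
  let c3 := g 'T' - c2 - c8
  let c1 := g 'O' - c0 - c2 - c4
  let c9 := g 'I' - c6 - c5 - c8
  String.ofList
    (PySem.List.pyRepeat ['0'] c0 ++ PySem.List.pyRepeat ['1'] c1 ++
     PySem.List.pyRepeat ['2'] c2 ++ PySem.List.pyRepeat ['3'] c3 ++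
     PySem.List.pyRepeat ['4'] c4 ++ PySem.List.pyRepeat ['5'] c5 ++
     PySem.List.pyRepeat ['6'] c6 ++ PySem.List.pyRepeat ['7'] c7 ++
     PySem.List.pyRepeat ['8'] c8 ++ PySem.List.pyRepeat ['9'] c9)

-- ===== PRECONDITION & SPEC =====
-- Pre_sleep holds exactly when every n.remove(j) in A finds its letter: at each of the
-- ten stages (order Z X W S V U G T O I) the letters of that digit's word are still
-- available often enough.  Outside Pre_sleep A raises ValueError.
def Pre_sleep (n : String) : Prop :=
  let m := fun (ch : Char) => (n.toList.count ch : Int)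
  let c0 := m 'Z'
  let c6 := m 'X'
  let c2 := m 'W'
  let c7 := m 'S' - c6
  let c5 := m 'V' - c7
  let c4 := m 'U'
  let c8 := m 'G'
  let c3 := m 'T' - c2 - c8
  let c1 := m 'O' - c0 - c2 - c4
  let c9 := m 'I' - c6 - c5 - c8
  c0 ≤ m 'E' ∧ c0 ≤ m 'R' ∧ c0 ≤ m 'O' ∧                                -- ZERO
  c6 ≤ m 'S' ∧ c6 ≤ m 'I' ∧                                             -- SIX
  c2 ≤ m 'T' ∧ c2 ≤ m 'O' - c0 ∧                                        -- TWO
  2 * c7 ≤ m 'E' - c0 ∧ c7 ≤ m 'V' ∧ c7 ≤ m 'N' ∧                      -- SEVEN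
  c5 ≤ m 'F' ∧ c5 ≤ m 'I' - c6 ∧ c5 ≤ m 'E' - c0 - 2 * c7 ∧            -- FIVE
  c4 ≤ m 'F' - c5 ∧ c4 ≤ m 'O' - c0 - c2 ∧ c4 ≤ m 'R' - c0 ∧          -- FOUR
  c8 ≤ m 'E' - c0 - 2 * c7 - c5 ∧ c8 ≤ m 'I' - c6 - c5 ∧ c8 ≤ m 'H' ∧ c8 ≤ m 'T' - c2 ∧  -- EIGHT
  c3 ≤ m 'H' - c8 ∧ c3 ≤ m 'R' - c0 - c4 ∧ 2 * c3 ≤ m 'E' - c0 - 2 * c7 - c5 - c8 ∧      -- THREE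
  c1 ≤ m 'N' - c7 ∧ c1 ≤ m 'E' - c0 - 2 * c7 - c5 - c8 - 2 * c3 ∧      -- ONE
  2 * c9 ≤ m 'N' - c7 - c1 ∧ c9 ≤ m 'E' - c0 - 2 * c7 - c5 - c8 - 2 * c3 - c1  -- NINE

instance (n : String) : Decidable (Pre_sleep n) := by unfold Pre_sleep; infer_instance

def pvWitness_sleep : String := "ONEZERO"

def Spec_sleep (n : String) (out : String) : Prop := out = sleep_alt n
instance (n : String) (out : String) : Decidable (Spec_sleep n out) := by unfold Spec_sleep; infer_instance

-- ===== CLAIM (what is proved, stated in full; the proofs are below) =====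
def Claim_equal_sleep : Prop := ∀ (n : String), Dom_sleep n → Pre_sleep n → Spec_sleep n (sleep n)

-- ===== LEMMAS AND PROOFS =====

theorem count_pvRemove (xs : List Char) (v : Char) (h : v ∈ xs) (ch : Char) :
    (pvRemove xs v).count ch = xs.count ch - if v = ch then 1 else 0 := by
  simp [pvRemove, PySem.List.remove?_eq_some_erase xs v h, List.count_erase]

theorem count_foldl_pvRemove (w : List Char) (xs : List Char)
    (h : ∀ ch, w.count ch ≤ xs.count ch) (ch : Char) :
    (w.foldl pvRemove xs).count ch = xs.count ch - w.count ch := by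
  induction w generalizing xs with
  | nil => simp
  | cons j t ih =>
    have hj : j ∈ xs := by
      have := h j
      simp [List.count_cons] at this
      exact List.count_pos_iff.mp (by omega)
    have ht : ∀ c, t.count c ≤ (pvRemove xs j).count c := by
      intro c
      rw [count_pvRemove xs j hj c]
      have := h c
      rcases eq_or_ne j c with hc | hc <;> simp [List.count_cons, hc] at this ⊢ <;> omega
    rw [List.foldl_cons, ih (pvRemove xs j) ht, count_pvRemove xs j hj ch]
    have := h ch
    rcases eq_or_ne j ch with hc | hc <;> simp [List.count_cons, hc] at this ⊢ <;> omega

-- the inner `for i in range(c)` loop of one stage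
theorem stageLoop (w : List Char) (dg : Int) (c : Nat) (a : List Int) (xs : List Char)
    (h : ∀ ch, c * w.count ch ≤ xs.count ch) :
    ((PySem.List.pyRange 0 (c : Int)).foldl
        (fun st2 (_ : Int) => (st2.1 ++ [dg], w.foldl pvRemove st2.2)) (a, xs)).1
      = a ++ List.replicate c dg ∧
    ∀ ch, ((PySem.List.pyRange 0 (c : Int)).foldl
        (fun st2 (_ : Int) => (st2.1 ++ [dg], w.foldl pvRemove st2.2)) (a, xs)).2.count ch
      = xs.count ch - c * w.count ch := by
  induction c with
  | zero => simp [PySem.List.pyRange]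
  | succ k ih =>
    have hk : ∀ ch, k * w.count ch ≤ xs.count ch := by
      intro ch
      exact le_trans (Nat.mul_le_mul_right _ (Nat.le_succ k)) (h ch)
    obtain ⟨ih1, ih2⟩ := ih hk
    have hrange : PySem.List.pyRange 0 ((k + 1 : Nat) : Int)
        = PySem.List.pyRange 0 (k : Int) ++ [(k : Int)] := by
      push_cast
      exact PySem.List.pyRange_one_succ_right (by positivity)
    rw [hrange, List.foldl_append]
    have hw : ∀ ch, w.count ch ≤ ((PySem.List.pyRange 0 (k : Int)).foldl
        (fun st2 (_ : Int) => (st2.1 ++ [dg], w.foldl pvRemove st2.2)) (a, xs)).2.count ch := by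
      intro ch
      rw [ih2 ch]
      have := h ch
      rw [Nat.succ_mul] at this
      omega
    constructor
    · simp only [List.foldl_cons, List.foldl_nil, ih1, List.replicate_succ']
      simp
    · intro ch
      simp only [List.foldl_cons, List.foldl_nil]
      rw [count_foldl_pvRemove w _ hw ch, ih2 ch]
      have := h ch
      rw [Nat.succ_mul]
      omega

-- turn per-letter bounds into the ∀-form stageLoop wants
theorem bounds_of_mem (w : List Char) (c : Nat) (xs : List Char)
    (h : ∀ ch ∈ w, c * w.count ch ≤ xs.count ch) :
    ∀ ch, c * w.count ch ≤ xs.count ch := by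
  intro ch
  by_cases hm : ch ∈ w
  · exact h ch hm
  · simp [List.count_eq_zero_of_not_mem hm]

-- characterisation of one pvStep application, given the current counts
theorem pvStep_spec (x : Char) (w : List Char) (dg : Int) (st : List Int × List Char)
    (hd : pvD.getD x (0, "") = (dg, String.ofList w))
    (h : ∀ ch ∈ w, st.2.count x * w.count ch ≤ st.2.count ch) :
    (pvStep st x).1 = st.1 ++ List.replicate (st.2.count x) dg ∧
    ∀ ch, (pvStep st x).2.count ch = st.2.count ch - st.2.count x * w.count ch := by
  have hW : (String.ofList w).toList = w := by simp
  have := stageLoop w dg (st.2.count x) st.1 st.2 (bounds_of_mem w (st.2.count x) st.2 h)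
  simpa [pvStep, hd, hW] using this

-- ===== VERDICT helper: the main equivalence =====
theorem pairwise_append_replicate_le (d : Int) (k : Nat) (l : List Int)
    (hl : l.Pairwise (fun a b => a ≤ b)) (hall : ∀ y ∈ l, y ≤ d) :
    (l ++ List.replicate k d).Pairwise (fun a b => a ≤ b) := by
  rw [List.pairwise_append]
  refine ⟨hl, (List.pairwise_replicate).mpr (Or.inr le_rfl), ?_⟩
  intro a ha b hb
  rw [List.eq_of_mem_replicate hb]
  exact hall a ha

theorem sleep_alt_eq (n : String) (hxs : List.count 'X' n.toList ≤ List.count 'S' n.toList)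
    (hv : List.count 'S' n.toList - List.count 'X' n.toList ≤ List.count 'V' n.toList) :
    sleep_alt n = String.ofList (List.replicate (List.count 'Z' n.toList) '0' ++ List.replicate (List.count 'O' n.toList - (List.count 'Z' n.toList + List.count 'W' n.toList + List.count 'U' n.toList)) '1' ++ List.replicate (List.count 'W' n.toList) '2' ++ List.replicate (List.count 'T' n.toList - (List.count 'W' n.toList + List.count 'G' n.toList)) '3' ++ List.replicate (List.count 'U' n.toList) '4' ++ List.replicate (List.count 'V' n.toList - (List.count 'S' n.toList - List.count 'X' n.toList)) '5' ++ List.replicate (List.count 'X' n.toList) '6' ++ List.replicate (List.count 'S' n.toList - List.count 'X' n.toList) '7' ++ List.replicate (List.count 'G' n.toList) '8' ++ List.replicate (List.count 'I' n.toList - (List.count 'X' n.toList + (List.count 'V' n.toList - (List.count 'S' n.toList - List.count 'X' n.toList)) + List.count 'G' n.toList)) '9') := by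
  unfold sleep_alt
  simp only [PySem.Dict.getD_foldl_insert_add_one, PySem.Dict.getD_empty, zero_add,
    PySem.List.pyRepeat_singleton]
  congr 1
  rw [show ((↑(List.count 'Z' n.toList) : Int)).toNat = (List.count 'Z' n.toList) from by omega]
  rw [show (((↑(List.count 'O' n.toList) : Int) - (↑(List.count 'Z' n.toList) : Int) - (↑(List.count 'W' n.toList) : Int) - (↑(List.count 'U' n.toList) : Int))).toNat = (List.count 'O' n.toList - (List.count 'Z' n.toList + List.count 'W' n.toList + List.count 'U' n.toList)) from by omega]
  rw [show ((↑(List.count 'W' n.toList) : Int)).toNat = (List.count 'W' n.toList) from by omega]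
  rw [show (((↑(List.count 'T' n.toList) : Int) - (↑(List.count 'W' n.toList) : Int) - (↑(List.count 'G' n.toList) : Int))).toNat = (List.count 'T' n.toList - (List.count 'W' n.toList + List.count 'G' n.toList)) from by omega]
  rw [show ((↑(List.count 'U' n.toList) : Int)).toNat = (List.count 'U' n.toList) from by omega]
  rw [show (((↑(List.count 'V' n.toList) : Int) - ((↑(List.count 'S' n.toList) : Int) - (↑(List.count 'X' n.toList) : Int)))).toNat = (List.count 'V' n.toList - (List.count 'S' n.toList - List.count 'X' n.toList)) from by omega]
  rw [show ((↑(List.count 'X' n.toList) : Int)).toNat = (List.count 'X' n.toList) from by omega]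
  rw [show (((↑(List.count 'S' n.toList) : Int) - (↑(List.count 'X' n.toList) : Int))).toNat = (List.count 'S' n.toList - List.count 'X' n.toList) from by omega]
  rw [show ((↑(List.count 'G' n.toList) : Int)).toNat = (List.count 'G' n.toList) from by omega]
  rw [show (((↑(List.count 'I' n.toList) : Int) - (↑(List.count 'X' n.toList) : Int) - ((↑(List.count 'V' n.toList) : Int) - ((↑(List.count 'S' n.toList) : Int) - (↑(List.count 'X' n.toList) : Int))) - (↑(List.count 'G' n.toList) : Int))).toNat = (List.count 'I' n.toList - (List.count 'X' n.toList + (List.count 'V' n.toList - (List.count 'S' n.toList - List.count 'X' n.toList)) + List.count 'G' n.toList)) from by omega]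

set_option maxHeartbeats 2000000 in
theorem sleep_eq (n : String) (hpre : Pre_sleep n) : sleep n = sleep_alt n := by
  simp only [Pre_sleep] at hpre
  obtain ⟨h01, h02, h03, h04, h05, h06, h07, h08, h09, h10, h11, h12, h13, h14, h15, h16, h17, h18, h19, h20, h21, h22, h23, h24, h25, h26, h27⟩ := hpre
  -- stage 1: 'Z' -> digit 0, word ZERO
  have hb1 : ∀ ch ∈ (['Z', 'E', 'R', 'O'] : List Char), (((([] : List Int)), n.toList)).2.count 'Z' * List.count ch ['Z', 'E', 'R', 'O'] ≤ (((([] : List Int)), n.toList)).2.count ch := by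
    intro ch hm
    fin_cases hm <;> simp <;> omega
  have hk1 : (((([] : List Int)), n.toList)).2.count 'Z' = (List.count 'Z' n.toList) := by simp
  obtain ⟨hA1, hCs1⟩ := pvStep_spec 'Z' ['Z', 'E', 'R', 'O'] 0 (((([] : List Int)), n.toList)) (by decide) hb1
  set st1 := pvStep (((([] : List Int)), n.toList)) 'Z' with hst1
  rw [hk1] at hA1
  have hC1 : ∀ ch, st1.2.count ch = List.count ch n.toList - ((List.count 'Z' n.toList) * List.count ch ['Z', 'E', 'R', 'O']) := by
    intro ch
    rw [hCs1 ch, hk1]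
    try simp
  -- stage 2: 'X' -> digit 6, word SIX
  have hb2 : ∀ ch ∈ (['S', 'I', 'X'] : List Char), st1.2.count 'X' * List.count ch ['S', 'I', 'X'] ≤ st1.2.count ch := by
    intro ch hm
    fin_cases hm <;> simp only [hC1] <;> simp <;> omega
  have hk2 : st1.2.count 'X' = (List.count 'X' n.toList) := by
    have h := hC1 'X'
    simp at h
    omega
  obtain ⟨hA2, hCs2⟩ := pvStep_spec 'X' ['S', 'I', 'X'] 6 (st1) (by decide) hb2
  set st2 := pvStep (st1) 'X' with hst2
  rw [hk2] at hA2
  have hC2 : ∀ ch, st2.2.count ch = List.count ch n.toList - ((List.count 'Z' n.toList) * List.count ch ['Z', 'E', 'R', 'O'] + (List.count 'X' n.toList) * List.count ch ['S', 'I', 'X']) := by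
    intro ch
    rw [hCs2 ch, hk2, hC1 ch]
    omega
  -- stage 3: 'W' -> digit 2, word TWO
  have hb3 : ∀ ch ∈ (['T', 'W', 'O'] : List Char), st2.2.count 'W' * List.count ch ['T', 'W', 'O'] ≤ st2.2.count ch := by
    intro ch hm
    fin_cases hm <;> simp only [hC2] <;> simp <;> omega
  have hk3 : st2.2.count 'W' = (List.count 'W' n.toList) := by
    have h := hC2 'W'
    simp at h
    omega
  obtain ⟨hA3, hCs3⟩ := pvStep_spec 'W' ['T', 'W', 'O'] 2 (st2) (by decide) hb3
  set st3 := pvStep (st2) 'W' with hst3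
  rw [hk3] at hA3
  have hC3 : ∀ ch, st3.2.count ch = List.count ch n.toList - ((List.count 'Z' n.toList) * List.count ch ['Z', 'E', 'R', 'O'] + (List.count 'X' n.toList) * List.count ch ['S', 'I', 'X'] + (List.count 'W' n.toList) * List.count ch ['T', 'W', 'O']) := by
    intro ch
    rw [hCs3 ch, hk3, hC2 ch]
    omega
  -- stage 4: 'S' -> digit 7, word SEVEN
  have hb4 : ∀ ch ∈ (['S', 'E', 'V', 'E', 'N'] : List Char), st3.2.count 'S' * List.count ch ['S', 'E', 'V', 'E', 'N'] ≤ st3.2.count ch := by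
    intro ch hm
    fin_cases hm <;> simp only [hC3] <;> simp <;> omega
  have hk4 : st3.2.count 'S' = (List.count 'S' n.toList - List.count 'X' n.toList) := by
    have h := hC3 'S'
    simp at h
    omega
  obtain ⟨hA4, hCs4⟩ := pvStep_spec 'S' ['S', 'E', 'V', 'E', 'N'] 7 (st3) (by decide) hb4
  set st4 := pvStep (st3) 'S' with hst4
  rw [hk4] at hA4
  have hC4 : ∀ ch, st4.2.count ch = List.count ch n.toList - ((List.count 'Z' n.toList) * List.count ch ['Z', 'E', 'R', 'O'] + (List.count 'X' n.toList) * List.count ch ['S', 'I', 'X'] + (List.count 'W' n.toList) * List.count ch ['T', 'W', 'O'] + (List.count 'S' n.toList - List.count 'X' n.toList) * List.count ch ['S', 'E', 'V', 'E', 'N']) := by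
    intro ch
    rw [hCs4 ch, hk4, hC3 ch]
    omega
  -- stage 5: 'V' -> digit 5, word FIVE
  have hb5 : ∀ ch ∈ (['F', 'I', 'V', 'E'] : List Char), st4.2.count 'V' * List.count ch ['F', 'I', 'V', 'E'] ≤ st4.2.count ch := by
    intro ch hm
    fin_cases hm <;> simp only [hC4] <;> simp <;> omega
  have hk5 : st4.2.count 'V' = (List.count 'V' n.toList - (List.count 'S' n.toList - List.count 'X' n.toList)) := by
    have h := hC4 'V'
    simp at h
    omega
  obtain ⟨hA5, hCs5⟩ := pvStep_spec 'V' ['F', 'I', 'V', 'E'] 5 (st4) (by decide) hb5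
  set st5 := pvStep (st4) 'V' with hst5
  rw [hk5] at hA5
  have hC5 : ∀ ch, st5.2.count ch = List.count ch n.toList - ((List.count 'Z' n.toList) * List.count ch ['Z', 'E', 'R', 'O'] + (List.count 'X' n.toList) * List.count ch ['S', 'I', 'X'] + (List.count 'W' n.toList) * List.count ch ['T', 'W', 'O'] + (List.count 'S' n.toList - List.count 'X' n.toList) * List.count ch ['S', 'E', 'V', 'E', 'N'] + (List.count 'V' n.toList - (List.count 'S' n.toList - List.count 'X' n.toList)) * List.count ch ['F', 'I', 'V', 'E']) := by
    intro ch
    rw [hCs5 ch, hk5, hC4 ch]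
    omega
  -- stage 6: 'U' -> digit 4, word FOUR
  have hb6 : ∀ ch ∈ (['F', 'O', 'U', 'R'] : List Char), st5.2.count 'U' * List.count ch ['F', 'O', 'U', 'R'] ≤ st5.2.count ch := by
    intro ch hm
    fin_cases hm <;> simp only [hC5] <;> simp <;> omega
  have hk6 : st5.2.count 'U' = (List.count 'U' n.toList) := by
    have h := hC5 'U'
    simp at h
    omega
  obtain ⟨hA6, hCs6⟩ := pvStep_spec 'U' ['F', 'O', 'U', 'R'] 4 (st5) (by decide) hb6
  set st6 := pvStep (st5) 'U' with hst6
  rw [hk6] at hA6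
  have hC6 : ∀ ch, st6.2.count ch = List.count ch n.toList - ((List.count 'Z' n.toList) * List.count ch ['Z', 'E', 'R', 'O'] + (List.count 'X' n.toList) * List.count ch ['S', 'I', 'X'] + (List.count 'W' n.toList) * List.count ch ['T', 'W', 'O'] + (List.count 'S' n.toList - List.count 'X' n.toList) * List.count ch ['S', 'E', 'V', 'E', 'N'] + (List.count 'V' n.toList - (List.count 'S' n.toList - List.count 'X' n.toList)) * List.count ch ['F', 'I', 'V', 'E'] + (List.count 'U' n.toList) * List.count ch ['F', 'O', 'U', 'R']) := by
    intro ch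
    rw [hCs6 ch, hk6, hC5 ch]
    omega
  -- stage 7: 'G' -> digit 8, word EIGHT
  have hb7 : ∀ ch ∈ (['E', 'I', 'G', 'H', 'T'] : List Char), st6.2.count 'G' * List.count ch ['E', 'I', 'G', 'H', 'T'] ≤ st6.2.count ch := by
    intro ch hm
    fin_cases hm <;> simp only [hC6] <;> simp <;> omega
  have hk7 : st6.2.count 'G' = (List.count 'G' n.toList) := by
    have h := hC6 'G'
    simp at h
    omega
  obtain ⟨hA7, hCs7⟩ := pvStep_spec 'G' ['E', 'I', 'G', 'H', 'T'] 8 (st6) (by decide) hb7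
  set st7 := pvStep (st6) 'G' with hst7
  rw [hk7] at hA7
  have hC7 : ∀ ch, st7.2.count ch = List.count ch n.toList - ((List.count 'Z' n.toList) * List.count ch ['Z', 'E', 'R', 'O'] + (List.count 'X' n.toList) * List.count ch ['S', 'I', 'X'] + (List.count 'W' n.toList) * List.count ch ['T', 'W', 'O'] + (List.count 'S' n.toList - List.count 'X' n.toList) * List.count ch ['S', 'E', 'V', 'E', 'N'] + (List.count 'V' n.toList - (List.count 'S' n.toList - List.count 'X' n.toList)) * List.count ch ['F', 'I', 'V', 'E'] + (List.count 'U' n.toList) * List.count ch ['F', 'O', 'U', 'R'] + (List.count 'G' n.toList) * List.count ch ['E', 'I', 'G', 'H', 'T']) := by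
    intro ch
    rw [hCs7 ch, hk7, hC6 ch]
    omega
  -- stage 8: 'T' -> digit 3, word THREE
  have hb8 : ∀ ch ∈ (['T', 'H', 'R', 'E', 'E'] : List Char), st7.2.count 'T' * List.count ch ['T', 'H', 'R', 'E', 'E'] ≤ st7.2.count ch := by
    intro ch hm
    fin_cases hm <;> simp only [hC7] <;> simp <;> omega
  have hk8 : st7.2.count 'T' = (List.count 'T' n.toList - (List.count 'W' n.toList + List.count 'G' n.toList)) := by
    have h := hC7 'T'
    simp at h
    omega
  obtain ⟨hA8, hCs8⟩ := pvStep_spec 'T' ['T', 'H', 'R', 'E', 'E'] 3 (st7) (by decide) hb8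
  set st8 := pvStep (st7) 'T' with hst8
  rw [hk8] at hA8
  have hC8 : ∀ ch, st8.2.count ch = List.count ch n.toList - ((List.count 'Z' n.toList) * List.count ch ['Z', 'E', 'R', 'O'] + (List.count 'X' n.toList) * List.count ch ['S', 'I', 'X'] + (List.count 'W' n.toList) * List.count ch ['T', 'W', 'O'] + (List.count 'S' n.toList - List.count 'X' n.toList) * List.count ch ['S', 'E', 'V', 'E', 'N'] + (List.count 'V' n.toList - (List.count 'S' n.toList - List.count 'X' n.toList)) * List.count ch ['F', 'I', 'V', 'E'] + (List.count 'U' n.toList) * List.count ch ['F', 'O', 'U', 'R'] + (List.count 'G' n.toList) * List.count ch ['E', 'I', 'G', 'H', 'T'] + (List.count 'T' n.toList - (List.count 'W' n.toList + List.count 'G' n.toList)) * List.count ch ['T', 'H', 'R', 'E', 'E']) := by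
    intro ch
    rw [hCs8 ch, hk8, hC7 ch]
    omega
  -- stage 9: 'O' -> digit 1, word ONE
  have hb9 : ∀ ch ∈ (['O', 'N', 'E'] : List Char), st8.2.count 'O' * List.count ch ['O', 'N', 'E'] ≤ st8.2.count ch := by
    intro ch hm
    fin_cases hm <;> simp only [hC8] <;> simp <;> omega
  have hk9 : st8.2.count 'O' = (List.count 'O' n.toList - (List.count 'Z' n.toList + List.count 'W' n.toList + List.count 'U' n.toList)) := by
    have h := hC8 'O'
    simp at h
    omega
  obtain ⟨hA9, hCs9⟩ := pvStep_spec 'O' ['O', 'N', 'E'] 1 (st8) (by decide) hb9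
  set st9 := pvStep (st8) 'O' with hst9
  rw [hk9] at hA9
  have hC9 : ∀ ch, st9.2.count ch = List.count ch n.toList - ((List.count 'Z' n.toList) * List.count ch ['Z', 'E', 'R', 'O'] + (List.count 'X' n.toList) * List.count ch ['S', 'I', 'X'] + (List.count 'W' n.toList) * List.count ch ['T', 'W', 'O'] + (List.count 'S' n.toList - List.count 'X' n.toList) * List.count ch ['S', 'E', 'V', 'E', 'N'] + (List.count 'V' n.toList - (List.count 'S' n.toList - List.count 'X' n.toList)) * List.count ch ['F', 'I', 'V', 'E'] + (List.count 'U' n.toList) * List.count ch ['F', 'O', 'U', 'R'] + (List.count 'G' n.toList) * List.count ch ['E', 'I', 'G', 'H', 'T'] + (List.count 'T' n.toList - (List.count 'W' n.toList + List.count 'G' n.toList)) * List.count ch ['T', 'H', 'R', 'E', 'E'] + (List.count 'O' n.toList - (List.count 'Z' n.toList + List.count 'W' n.toList + List.count 'U' n.toList)) * List.count ch ['O', 'N', 'E']) := by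
    intro ch
    rw [hCs9 ch, hk9, hC8 ch]
    omega
  -- stage 10: 'I' -> digit 9, word NINE
  have hb10 : ∀ ch ∈ (['N', 'I', 'N', 'E'] : List Char), st9.2.count 'I' * List.count ch ['N', 'I', 'N', 'E'] ≤ st9.2.count ch := by
    intro ch hm
    fin_cases hm <;> simp only [hC9] <;> simp <;> omega
  have hk10 : st9.2.count 'I' = (List.count 'I' n.toList - (List.count 'X' n.toList + (List.count 'V' n.toList - (List.count 'S' n.toList - List.count 'X' n.toList)) + List.count 'G' n.toList)) := by
    have h := hC9 'I'
    simp at h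
    omega
  obtain ⟨hA10, hCs10⟩ := pvStep_spec 'I' ['N', 'I', 'N', 'E'] 9 (st9) (by decide) hb10
  set st10 := pvStep (st9) 'I' with hst10
  rw [hk10] at hA10
  have hC10 : ∀ ch, st10.2.count ch = List.count ch n.toList - ((List.count 'Z' n.toList) * List.count ch ['Z', 'E', 'R', 'O'] + (List.count 'X' n.toList) * List.count ch ['S', 'I', 'X'] + (List.count 'W' n.toList) * List.count ch ['T', 'W', 'O'] + (List.count 'S' n.toList - List.count 'X' n.toList) * List.count ch ['S', 'E', 'V', 'E', 'N'] + (List.count 'V' n.toList - (List.count 'S' n.toList - List.count 'X' n.toList)) * List.count ch ['F', 'I', 'V', 'E'] + (List.count 'U' n.toList) * List.count ch ['F', 'O', 'U', 'R'] + (List.count 'G' n.toList) * List.count ch ['E', 'I', 'G', 'H', 'T'] + (List.count 'T' n.toList - (List.count 'W' n.toList + List.count 'G' n.toList)) * List.count ch ['T', 'H', 'R', 'E', 'E'] + (List.count 'O' n.toList - (List.count 'Z' n.toList + List.count 'W' n.toList + List.count 'U' n.toList)) * List.count ch ['O', 'N', 'E'] + (List.count 'I' n.toList - (List.count 'X' n.toList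 + (List.count 'V' n.toList - (List.count 'S' n.toList - List.count 'X' n.toList)) + List.count 'G' n.toList)) * List.count ch ['N', 'I', 'N', 'E']) := by
    intro ch
    rw [hCs10 ch, hk10, hC9 ch]
    omega
  have hfold : List.foldl pvStep (((([] : List Int)), n.toList)) pvL = st10 := by
    simp only [pvL, List.foldl_cons, List.foldl_nil]
    rw [← hst1, ← hst2, ← hst3, ← hst4, ← hst5, ← hst6, ← hst7, ← hst8, ← hst9, ← hst10]
  have hperm : (List.replicate (List.count 'Z' n.toList) (0 : Int) ++ List.replicate (List.count 'O' n.toList - (List.count 'Z' n.toList + List.count 'W' n.toList + List.count 'U' n.toList)) (1 : Int) ++ List.replicate (List.count 'W' n.toList) (2 : Int) ++ List.replicate (List.count 'T' n.toList - (List.count 'W' n.toList + List.count 'G' n.toList)) (3 : Int) ++ List.replicate (List.count 'U' n.toList) (4 : Int) ++ List.replicate (List.count 'V' n.toList - (List.count 'S' n.toList - List.count 'X' n.toList)) (5 : Int) ++ List.replicate (List.count 'X' n.toList) (6 : Int) ++ List.replicate (List.count 'S' n.toList - List.count 'X' n.toList) (7 : Int) ++ List.replicate (List.count 'G' n.toList)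 (8 : Int) ++ List.replicate (List.count 'I' n.toList - (List.count 'X' n.toList + (List.count 'V' n.toList - (List.count 'S' n.toList - List.count 'X' n.toList)) + List.count 'G' n.toList)) (9 : Int)).Perm (((((((((([] ++ List.replicate (List.count 'Z' n.toList) (0 : Int)) ++ List.replicate (List.count 'X' n.toList) (6 : Int)) ++ List.replicate (List.count 'W' n.toList) (2 : Int)) ++ List.replicate (List.count 'S' n.toList - List.count 'X' n.toList) (7 : Int)) ++ List.replicate (List.count 'V' n.toList - (List.count 'S' n.toList - List.count 'X' n.toList)) (5 : Int)) ++ List.replicate (List.count 'U' n.toList) (4 : Int)) ++ List.replicate (List.count 'G' n.toList) (8 : Int)) ++ List.replicate (List.count 'T' n.toList - (List.count 'W' n.toList + List.count 'G' n.toList)) (3 : Int)) ++ List.replicate (List.count 'O' n.toList - (List.count 'Z' n.toList + List.count 'W' n.toList + List.count 'U' n.toList)) (1 : Int)) ++ List.replicate (List.count 'I' n.toList - (List.count 'X' n.toList + (List.count 'V' n.toList - (List.count 'S' n.toList - List.count 'X' n.toList)) + List.count 'G' n.toList)) (9 : Int)) := by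
    rw [List.perm_iff_count]
    intro x
    simp only [List.count_append, List.count_replicate, List.count_nil]
    by_cases hd0 : x = 0
    · simp [hd0] <;> omega
    ·
      by_cases hd1 : x = 1
      · simp [hd1] <;> omega
      ·
        by_cases hd2 : x = 2
        · simp [hd2] <;> omega
        ·
          by_cases hd3 : x = 3
          · simp [hd3] <;> omega
          ·
            by_cases hd4 : x = 4
            · simp [hd4] <;> omega
            ·
              by_cases hd5 : x = 5
              · simp [hd5] <;> omega
              ·
                by_cases hd6 : x = 6
                · simp [hd6] <;> omega
                ·
                  by_cases hd7 : x = 7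
                  · simp [hd7] <;> omega
                  ·
                    by_cases hd8 : x = 8
                    · simp [hd8] <;> omega
                    ·
                      by_cases hd9 : x = 9
                      · simp [hd9] <;> omega
                      · simp [beq_iff_eq, Ne.symm hd0, Ne.symm hd1, Ne.symm hd2, Ne.symm hd3, Ne.symm hd4, Ne.symm hd5, Ne.symm hd6, Ne.symm hd7, Ne.symm hd8, Ne.symm hd9]
  have hpair : (List.replicate (List.count 'Z' n.toList) (0 : Int) ++ List.replicate (List.count 'O' n.toList - (List.count 'Z' n.toList + List.count 'W' n.toList + List.count 'U' n.toList)) (1 : Int) ++ List.replicate (List.count 'W' n.toList) (2 : Int) ++ List.replicate (List.count 'T' n.toList - (List.count 'W' n.toList + List.count 'G' n.toList)) (3 : Int) ++ List.replicate (List.count 'U' n.toList) (4 : Int) ++ List.replicate (List.count 'V' n.toList - (List.count 'S' n.toList - List.count 'X' n.toList)) (5 : Int) ++ List.replicate (List.count 'X' n.toList) (6 : Int) ++ List.replicate (List.count 'S' n.toList - List.count 'X' n.toList) (7 : Int) ++ List.replicate (List.count 'G' n.toList) (8 : Int) ++ List.replicate (List.count 'I' n.toList - (List.count 'X' n.toList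 + (List.count 'V' n.toList - (List.count 'S' n.toList - List.count 'X' n.toList)) + List.count 'G' n.toList)) (9 : Int)).Pairwise (fun a b => a ≤ b) := by
    refine pairwise_append_replicate_le 9 _ _ ?_ ?_
    case refine_2 =>
      intro y hy
      simp only [List.mem_append, List.mem_replicate] at hy
      omega
    refine pairwise_append_replicate_le 8 _ _ ?_ ?_
    case refine_2 =>
      intro y hy
      simp only [List.mem_append, List.mem_replicate] at hy
      omega
    refine pairwise_append_replicate_le 7 _ _ ?_ ?_
    case refine_2 =>
      intro y hy
      simp only [List.mem_append, List.mem_replicate] at hy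
      omega
    refine pairwise_append_replicate_le 6 _ _ ?_ ?_
    case refine_2 =>
      intro y hy
      simp only [List.mem_append, List.mem_replicate] at hy
      omega
    refine pairwise_append_replicate_le 5 _ _ ?_ ?_
    case refine_2 =>
      intro y hy
      simp only [List.mem_append, List.mem_replicate] at hy
      omega
    refine pairwise_append_replicate_le 4 _ _ ?_ ?_
    case refine_2 =>
      intro y hy
      simp only [List.mem_append, List.mem_replicate] at hy
      omega
    refine pairwise_append_replicate_le 3 _ _ ?_ ?_
    case refine_2 =>
      intro y hy
      simp only [List.mem_append, List.mem_replicate] at hy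
      omega
    refine pairwise_append_replicate_le 2 _ _ ?_ ?_
    case refine_2 =>
      intro y hy
      simp only [List.mem_append, List.mem_replicate] at hy
      omega
    refine pairwise_append_replicate_le 1 _ _ ?_ ?_
    case refine_2 =>
      intro y hy
      simp only [List.mem_append, List.mem_replicate] at hy
      omega
    exact (List.pairwise_replicate).mpr (Or.inr le_rfl)
  have hsorted : PySem.List.sorted (((((((((([] ++ List.replicate (List.count 'Z' n.toList) (0 : Int)) ++ List.replicate (List.count 'X' n.toList) (6 : Int)) ++ List.replicate (List.count 'W' n.toList) (2 : Int)) ++ List.replicate (List.count 'S' n.toList - List.count 'X' n.toList) (7 : Int)) ++ List.replicate (List.count 'V' n.toList - (List.count 'S' n.toList - List.count 'X' n.toList)) (5 : Int)) ++ List.replicate (List.count 'U' n.toList) (4 : Int)) ++ List.replicate (List.count 'G' n.toList) (8 : Int)) ++ List.replicate (List.count 'T' n.toList - (List.count 'W' n.toList + List.count 'G' n.toList)) (3 : Int)) ++ List.replicate (List.count 'O' n.toList - (List.count 'Z' n.toList + List.count 'W' n.toList + List.count 'U' n.toList)) (1 : Int)) ++ List.replicate (List.count 'I' n.toList - (List.count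 'X' n.toList + (List.count 'V' n.toList - (List.count 'S' n.toList - List.count 'X' n.toList)) + List.count 'G' n.toList)) (9 : Int)) (fun x => x) = (List.replicate (List.count 'Z' n.toList) (0 : Int) ++ List.replicate (List.count 'O' n.toList - (List.count 'Z' n.toList + List.count 'W' n.toList + List.count 'U' n.toList)) (1 : Int) ++ List.replicate (List.count 'W' n.toList) (2 : Int) ++ List.replicate (List.count 'T' n.toList - (List.count 'W' n.toList + List.count 'G' n.toList)) (3 : Int) ++ List.replicate (List.count 'U' n.toList) (4 : Int) ++ List.replicate (List.count 'V' n.toList - (List.count 'S' n.toList - List.count 'X' n.toList)) (5 : Int) ++ List.replicate (List.count 'X' n.toList) (6 : Int) ++ List.replicate (List.count 'S' n.toList - List.count 'X' n.toList) (7 : Int) ++ List.replicate (List.count 'G' n.toList) (8 : Int) ++ List.replicate (List.count 'I' n.toList - (List.count 'X' n.toList + (List.count 'V' n.toList - (List.count 'S' n.toList - List.count 'X' n.toList)) + List.count 'G' n.toList)) (9 : Int)) :=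
    PySem.List.sorted_id_eq_of_perm_of_pairwise _ _ hperm hpair
  have ht0 : String.toList (PySem.Int.toStr 0) = ['0'] := by decide
  have ht1 : String.toList (PySem.Int.toStr 1) = ['1'] := by decide
  have ht2 : String.toList (PySem.Int.toStr 2) = ['2'] := by decide
  have ht3 : String.toList (PySem.Int.toStr 3) = ['3'] := by decide
  have ht4 : String.toList (PySem.Int.toStr 4) = ['4'] := by decide
  have ht5 : String.toList (PySem.Int.toStr 5) = ['5'] := by decide
  have ht6 : String.toList (PySem.Int.toStr 6) = ['6'] := by decide
  have ht7 : String.toList (PySem.Int.toStr 7) = ['7'] := by decide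
  have ht8 : String.toList (PySem.Int.toStr 8) = ['8'] := by decide
  have ht9 : String.toList (PySem.Int.toStr 9) = ['9'] := by decide
  have hB := sleep_alt_eq n (by omega) (by omega)
  unfold sleep
  rw [hfold]
  rw [hA10, hA9, hA8, hA7, hA6, hA5, hA4, hA3, hA2, hA1]
  rw [hB]
  refine String.toList_inj.mp ?_
  rw [PySem.Str.toList_join]
  have hmap : ((List.replicate (List.count 'Z' n.toList) (0 : Int) ++ List.replicate (List.count 'O' n.toList - (List.count 'Z' n.toList + List.count 'W' n.toList + List.count 'U' n.toList)) (1 : Int) ++ List.replicate (List.count 'W' n.toList) (2 : Int) ++ List.replicate (List.count 'T' n.toList - (List.count 'W' n.toList + List.count 'G' n.toList)) (3 : Int) ++ List.replicate (List.count 'U' n.toList) (4 : Int) ++ List.replicate (List.count 'V' n.toList - (List.count 'S' n.toList - List.count 'X' n.toList)) (5 : Int) ++ List.replicate (List.count 'X' n.toList) (6 : Int) ++ List.replicate (List.count 'S' n.toList - List.count 'X' n.toList) (7 : Int) ++ List.replicate (List.count 'G' n.toList) (8 : Int) ++ List.replicate (List.count 'I' n.toList - (List.count 'X' n.toList + (List.count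 'V' n.toList - (List.count 'S' n.toList - List.count 'X' n.toList)) + List.count 'G' n.toList)) (9 : Int)).map PySem.Int.toStr).map String.toList = (List.replicate (List.count 'Z' n.toList) '0' ++ List.replicate (List.count 'O' n.toList - (List.count 'Z' n.toList + List.count 'W' n.toList + List.count 'U' n.toList)) '1' ++ List.replicate (List.count 'W' n.toList) '2' ++ List.replicate (List.count 'T' n.toList - (List.count 'W' n.toList + List.count 'G' n.toList)) '3' ++ List.replicate (List.count 'U' n.toList) '4' ++ List.replicate (List.count 'V' n.toList - (List.count 'S' n.toList - List.count 'X' n.toList)) '5' ++ List.replicate (List.count 'X' n.toList) '6' ++ List.replicate (List.count 'S' n.toList - List.count 'X' n.toList) '7' ++ List.replicate (List.count 'G' n.toList) '8' ++ List.replicate (List.count 'I' n.toList - (List.count 'X' n.toList + (List.count 'V' n.toList - (List.count 'S' n.toList - List.count 'X' n.toList)) + List.count 'G' n.toList)) '9').map (fun c => [c]) := by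
    simp [List.map_append, List.map_replicate, ht0, ht1, ht2, ht3, ht4, ht5, ht6, ht7, ht8, ht9]
  simp only [List.nil_append] at hsorted ⊢
  rw [hsorted, hmap]
  have hemp : ("".toList) = ([] : List Char) := by simp
  rw [hemp, PySem.Chars.join_nil_singletons]
  simp

-- ===== VERDICT (by name: the statement is the Claim_ definition above) =====
theorem sleep_spec : Claim_equal_sleep := by
  intro n _ hpre
  unfold Spec_sleep
  exact sleep_eq n hpre
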